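-- pv_equiv track=rewrite | github.com/mitchellostrow/NM2020 | utils.py | FindNumOfNeurons
-- ===== SOURCE A (Python) =====
-- def FindNumOfNeurons(dat):
--   """ Given one session, returns the number of neurons in each
--       of the brain regions it records from.
--   Args:
--       dat (dict): contains all recording information from one single session,
--                   including the brain area of each recorded neuron.
--   Return:
--       NN (dict): a dictionary contains all the recorded brain regions in one session
--                  as the key, and number of neurons in each of these regions
--   """
--
--   barea = dat['brain_area']
--   NN = {}
--   for i in range(len(barea)):
--     if barea[i] not in NN:
--       NN[barea[i]] = 0
--     NN[barea[i]] += 1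
--   return NN
-- ===== SOURCE B (Python) =====
-- def FindNumOfNeurons(dat):
--   """ Given one session, returns the number of neurons in each
--       of the brain regions it records from. """
--   NN = {}
--   xs = list(dat['brain_area'])
--   while xs:
--     head = xs[0]
--     rest = [x for x in xs[1:] if x != head]
--     NN[head] = len(xs) - len(rest)   # head never seen before: all its copies were removed
--     xs = rest
--   return NN
-- ===== Notes on version B (the rewrite author's own statement) =====
-- stated objective: alternative
-- what changed: Replaced A's per-element accumulating dict pass (membership test + increment for every element) by a partition-and-shrink loop: repeatedly take the first remaining region, filter out all its occurrences, and record its count as the length drop, so the worklist shrinks by a whole region per iteration and no per-element dict updates or membership tests are needed.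
import Mathlib
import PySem

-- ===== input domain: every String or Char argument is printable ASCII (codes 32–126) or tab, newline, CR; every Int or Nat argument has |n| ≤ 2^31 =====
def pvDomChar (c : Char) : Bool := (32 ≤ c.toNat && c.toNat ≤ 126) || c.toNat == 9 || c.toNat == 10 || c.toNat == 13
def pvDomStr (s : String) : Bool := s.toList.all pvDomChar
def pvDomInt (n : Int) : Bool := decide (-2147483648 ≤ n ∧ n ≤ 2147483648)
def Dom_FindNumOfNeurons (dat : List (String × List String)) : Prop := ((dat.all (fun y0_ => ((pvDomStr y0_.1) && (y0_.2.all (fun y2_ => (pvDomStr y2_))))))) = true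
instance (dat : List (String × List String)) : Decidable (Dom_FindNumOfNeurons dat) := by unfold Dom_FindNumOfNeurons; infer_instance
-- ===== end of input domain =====

-- B replaces A's per-element accumulating dict pass by a partition-and-shrink loop (alternative algorithm; return value only).


-- ===== PORT A =====
-- A: barea = dat['brain_area']; NN = {}; for i in range(len(barea)): if barea[i] not in NN: NN[barea[i]] = 0; NN[barea[i]] += 1; return NN
def FindNumOfNeurons (dat : List (String × List String)) : List (String × Int) :=
  match PySem.Dict.get? (PySem.Dict.mk dat) "brain_area" with
  | none => []  -- Python raises KeyError here; excluded by Pre_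
  | some barea =>
    ((PySem.List.pyRange 0 (PySem.List.len barea)).foldl
      (fun NN i =>
        let x := PySem.List.pyGetD barea i ""   -- barea[i]: i ∈ range(len(barea)), always in range
        let NN' := if NN.contains x then NN else NN.insert x (0 : Int)
        NN'.modify x 0 (· + 1))
      PySem.Dict.empty).items

-- ===== PORT B =====
-- B: while xs: head = xs[0]; rest = [x for x in xs[1:] if x != head]; NN[head] = len(xs) - len(rest); xs = rest
-- The while loop is the recursion below; NN[head] = … appends, since head was never seen
-- before (every earlier iteration removed ALL occurrences of its own head), so the dict
-- assignment of a fresh key is exactly a list append.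
def FindNumOfNeuronsAltGo : List String → List (String × Int) → List (String × Int)
  | [], NN => NN
  | x :: xs, NN =>
    let rest := xs.filter (fun y => !(y == x))
    FindNumOfNeuronsAltGo rest (NN ++ [(x, ((x :: xs).length : Int) - (rest.length : Int))])
termination_by xs _ => xs.length
decreasing_by simp only [List.length_unattach]; exact Nat.lt_succ_of_le (le_trans (List.length_filter_le _ _) (by simp))

def FindNumOfNeurons_alt (dat : List (String × List String)) : List (String × Int) :=
  match PySem.Dict.get? (PySem.Dict.mk dat) "brain_area" with
  | none => []  -- Python raises KeyError here; excluded by Pre_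
  | some barea => FindNumOfNeuronsAltGo barea []

-- ===== PRECONDITION & SPEC =====
-- Pre_ excludes exactly the inputs where dat['brain_area'] raises KeyError in both Pythons.
def Pre_FindNumOfNeurons (dat : List (String × List String)) : Prop :=
  (PySem.Dict.get? (PySem.Dict.mk dat) "brain_area").isSome = true
instance (dat : List (String × List String)) : Decidable (Pre_FindNumOfNeurons dat) := by unfold Pre_FindNumOfNeurons; infer_instance
def pvWitness_FindNumOfNeurons : (List (String × List String)) := [("brain_area", ["VISp", "CA1", "VISp"])]
def Spec_FindNumOfNeurons (dat : List (String × List String)) (out : List (String × Int)) : Prop := out = FindNumOfNeurons_alt dat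
instance (dat : List (String × List String)) (out : List (String × Int)) : Decidable (Spec_FindNumOfNeurons dat out) := by unfold Spec_FindNumOfNeurons; infer_instance

-- ===== CLAIM (what is proved, stated in full; the proofs are below) =====
def Claim_equal_FindNumOfNeurons : Prop := ∀ (dat : List (String × List String)), Dom_FindNumOfNeurons dat → Pre_FindNumOfNeurons dat → Spec_FindNumOfNeurons dat (FindNumOfNeurons dat)

-- ===== LEMMAS AND PROOFS =====

-- A's loop body (initialise-if-absent, then += 1) is exactly Counter's update step.
theorem step_eq_modify (d : PySem.Dict String Int) (x : String) :
    (let NN' := if d.contains x then d else d.insert x (0 : Int)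
     NN'.modify x 0 (· + 1)) = d.modify x 0 (· + 1) := by
  by_cases h : d.contains x = true
  · simp [h]
  · simp only [Bool.not_eq_true] at h
    simp [h, PySem.Dict.modify, PySem.Dict.insert_insert_self, PySem.Dict.getD_insert_self,
      PySem.Dict.getD_of_not_contains d 0 h]

-- Accumulator characterisation of PySem.Set.ofList: elements already in the accumulator are skipped.
theorem foldl_add_eq {α : Type} [BEq α] [LawfulBEq α] (xs : List α) (acc : List α) :
    List.foldl PySem.Set.add acc xs
      = acc ++ PySem.Set.ofList (xs.filter (fun y => !acc.contains y)) := by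
  induction hn : xs.length using Nat.strong_induction_on generalizing xs acc with
  | _ n ih =>
    cases xs with
    | nil => simp [PySem.Set.ofList, PySem.Set.empty]
    | cons y ys =>
      by_cases hy : acc.contains y = true
      · simp only [List.foldl_cons, PySem.Set.add, PySem.Set.contains, hy, if_true,
          List.filter_cons, Bool.not_true]
        exact ih ys.length (by simp [← hn]) ys acc rfl
      · simp only [Bool.not_eq_true] at hy
        simp only [List.foldl_cons, PySem.Set.add, PySem.Set.contains, hy, Bool.false_eq_true,
          if_false, List.filter_cons, Bool.not_false, ite_true]
        rw [ih ys.length (by simp [← hn]) ys (acc ++ [y]) rfl]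
        have h2 : PySem.Set.ofList (y :: ys.filter (fun z => !acc.contains z))
            = List.foldl PySem.Set.add ([] ++ [y]) (ys.filter (fun z => !acc.contains z)) := by
          simp [PySem.Set.ofList, PySem.Set.add, PySem.Set.empty, PySem.Set.contains]
        rw [h2, ih (ys.filter (fun z => !acc.contains z)).length
          (by rw [← hn]; simp only [List.length_cons];
              exact Nat.lt_succ_of_le (List.length_filter_le _ _))
          _ ([] ++ [y]) rfl]
        rw [List.filter_filter]
        simp only [List.nil_append, List.append_assoc, List.singleton_append]
        congr 2
        apply congrArg
        apply List.filter_congr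
        intro z _
        by_cases h : z = y <;> by_cases h2 : z ∈ acc <;> simp [h, h2]

-- Peeling the first element: ofList (x :: xs) = x :: ofList (xs without the x's).
theorem ofList_cons_filter {α : Type} [BEq α] [LawfulBEq α] (x : α) (xs : List α) :
    PySem.Set.ofList (x :: xs) = x :: PySem.Set.ofList (xs.filter (fun y => !(y == x))) := by
  have h0 : PySem.Set.ofList (x :: xs) = List.foldl PySem.Set.add ([] ++ [x]) xs := by
    simp [PySem.Set.ofList, PySem.Set.add, PySem.Set.empty, PySem.Set.contains]
  rw [h0, foldl_add_eq]
  simp only [List.nil_append, List.singleton_append]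
  congr 2
  apply List.filter_congr
  intro z _
  by_cases h : z = x <;> simp [h]

-- B's partition loop produces, appended to the accumulator, the first-appearance list of
-- distinct regions paired with their occurrence counts.
theorem altGo_eq (xs : List String) (NN : List (String × Int)) :
    FindNumOfNeuronsAltGo xs NN
      = NN ++ (PySem.Set.ofList xs).map (fun a => (a, (List.count a xs : Int))) := by
  induction hn : xs.length using Nat.strong_induction_on generalizing xs NN with
  | _ n ih =>
    cases xs with
    | nil => simp [FindNumOfNeuronsAltGo, PySem.Set.ofList, PySem.Set.empty]
    | cons x xs =>
      rw [FindNumOfNeuronsAltGo]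
      rw [ih (xs.filter (fun y => !(y == x))).length
        (by rw [← hn]; simp only [List.length_cons];
            exact Nat.lt_succ_of_le (List.length_filter_le _ _)) _ _ rfl]
      rw [ofList_cons_filter, List.map_cons, List.append_assoc, List.singleton_append]
      congr 2
      · -- head: len(x::xs) - len(rest) = count x (x::xs)
        have hlen : (xs.filter (fun y => !(y == x))).length
            = xs.length - List.count x xs := by
          rw [← List.countP_eq_length_filter]
          have h1 : List.count x xs = xs.countP (fun y => y == x) := by
            simp [List.count]
          have h2 : xs.countP (fun y => !(y == x)) + xs.countP (fun y => y == x)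
              = xs.length := by
            have h0 := List.length_eq_countP_add_countP (p := fun y => y == x) (l := xs)
            have heq : List.countP (fun a => !(a == x)) xs
                = List.countP (fun a => decide ¬((a == x) = true)) xs :=
              List.countP_congr (fun a _ => by by_cases h : a = x <;> simp [h])
            omega
          omega
        have hle : List.count x xs ≤ xs.length := List.count_le_length
        rw [hlen, List.count_cons_self]
        congr 1
        push_cast [Nat.cast_sub hle, List.length_cons]
        omega
      · -- tail: counts of the other regions are unchanged by removing the x's
        apply List.map_congr_left
        intro a ha
        rw [PySem.Set.mem_ofList] at ha
        have hax : (a == x) = false := by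
          have := (List.mem_filter.mp ha).2
          simpa using this
        have hne : a ≠ x := by simpa using hax
        have hcf : List.count a (xs.filter (fun y => !(y == x))) = List.count a xs :=
          List.count_filter (by simp [hax])
        rw [hcf, List.count_cons_of_ne hne.symm]

-- ===== VERDICT (by name: the statement is the Claim_ definition above) =====
theorem FindNumOfNeurons_spec : Claim_equal_FindNumOfNeurons := by
  intro dat _ _
  unfold Spec_FindNumOfNeurons FindNumOfNeurons FindNumOfNeurons_alt
  cases hget : PySem.Dict.get? (PySem.Dict.mk dat) "brain_area" with
  | none => rfl
  | some barea =>
    dsimp only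
    rw [PySem.List.foldl_pyRange_pyGetD barea ""
        (fun NN x => (if NN.contains x then NN else NN.insert x (0 : Int)).modify x 0 (· + 1))
        PySem.Dict.empty (le_refl 0)]
    simp only [Int.toNat_zero, List.drop_zero]
    rw [PySem.List.foldl_congr_mem _ _ (fun d x => d.modify x 0 (· + 1)) _
        (fun acc x _ => step_eq_modify acc x)]
    rw [← PySem.Dict.counter_eq_foldl, PySem.Dict.items_counter, altGo_eq]
    simp
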